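-- pv_equiv track=rewrite | github.com/smietanab/car_symulator | pow.py | ReadSignall
-- ===== SOURCE A (Python) =====
-- def ReadSignall(array, SignallName):
--     leng  = SignallName[1]
--     pos  = SignallName[0]
--     p = 0
--     value_to_return = 0
--     shortValue = 0
--     j = 0
--     for i in range(pos,pos+leng):
--         byte = i//8;
--         bit = i%8;
--         if ((array[byte] & (1 << bit)) != 0):
--             pow = 2**(p%8)
--             #if(pow < 256):
--             shortValue  = shortValue + pow
--         if((p%8) == 7):
--             value_to_return= value_to_return + (shortValue << j)
--             shortValue = 0
--             j = j+8
--         p = p+1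
--     value_to_return = value_to_return + (shortValue << j)
--     return value_to_return
-- ===== SOURCE B (Python) =====
-- def ReadSignall(array, SignallName):
--     pos, leng = SignallName
--     value = 0
--     for p in range(leng):
--         i = pos + p
--         if array[i // 8] & (1 << (i % 8)) != 0:
--             value += 1 << p
--     return value
-- ===== Notes on version B (the rewrite author's own statement) =====
-- stated objective: simpler
-- what changed: Dropped A's byte-grouped accumulator machinery (shortValue, flush-on-p%8==7, shift counter j) for a single accumulator that adds 1 << p whenever source bit pos+p is set.
import Mathlib
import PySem

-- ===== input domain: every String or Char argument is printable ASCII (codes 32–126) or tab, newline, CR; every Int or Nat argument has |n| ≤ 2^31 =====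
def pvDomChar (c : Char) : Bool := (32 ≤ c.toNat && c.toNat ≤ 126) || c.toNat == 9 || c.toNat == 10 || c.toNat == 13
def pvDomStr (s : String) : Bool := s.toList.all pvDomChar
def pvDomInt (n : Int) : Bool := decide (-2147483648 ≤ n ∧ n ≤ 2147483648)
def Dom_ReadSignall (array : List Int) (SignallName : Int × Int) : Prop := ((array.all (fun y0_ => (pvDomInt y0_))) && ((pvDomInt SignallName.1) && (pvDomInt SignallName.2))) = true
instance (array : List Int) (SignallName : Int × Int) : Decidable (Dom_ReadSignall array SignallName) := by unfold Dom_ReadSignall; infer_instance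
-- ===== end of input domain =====

-- B replaces A's byte-grouped accumulator (shortValue / j / flush machinery) with one direct
-- accumulator that adds 1 <<< p for every set source bit; objective: simpler, same cost.

-- ===== PORT A =====
-- loop body of A's for-loop; state = (p, value_to_return, shortValue, j)
def ReadSignallBody (array : List Int) (st : Int × Int × Int × Int) (i : Int) : Int × Int × Int × Int :=
  let p := st.1
  let value_to_return := st.2.1
  let shortValue := st.2.2.1
  let j := st.2.2.2
  let byte := PySem.Int.floordiv i 8
  let bit := PySem.Int.mod i 8
  -- array[byte]: pyGet? is exact Python indexing; Pre_ guarantees `some`, `.getD 0` totalizes.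
  -- bit = i % 8 and j are always nonnegative, so `.toNat` shifts are exact for Python `<<`.
  let shortValue :=
    if PySem.Int.band ((PySem.List.pyGet? array byte).getD 0) ((1 : Int) <<< bit.toNat) ≠ 0 then
      shortValue + 2 ^ (PySem.Int.mod p 8).toNat
    else shortValue
  if PySem.Int.mod p 8 = 7 then
    (p + 1, value_to_return + (shortValue <<< j.toNat), 0, j + 8)
  else
    (p + 1, value_to_return, shortValue, j)

def ReadSignall (array : List Int) (SignallName : Int × Int) : Int :=
  let leng := SignallName.2
  let pos := SignallName.1
  let st := (PySem.List.pyRange pos (pos + leng) 1).foldl (ReadSignallBody array) (0, 0, 0, 0)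
  st.2.1 + (st.2.2.1 <<< st.2.2.2.toNat)

-- ===== PORT B =====
def ReadSignall_alt (array : List Int) (SignallName : Int × Int) : Int :=
  let pos := SignallName.1
  let leng := SignallName.2
  (PySem.List.pyRange 0 leng 1).foldl
    (fun value p =>
      let i := pos + p
      if PySem.Int.band ((PySem.List.pyGet? array (PySem.Int.floordiv i 8)).getD 0)
           ((1 : Int) <<< (PySem.Int.mod i 8).toNat) ≠ 0 then
        value + ((1 : Int) <<< p.toNat)
      else value)
    0

-- ===== PRECONDITION & SPEC =====
-- Pre_ excludes exactly the inputs where Python A raises IndexError: some accessed byte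
-- index pos+t (0 ≤ t < leng) has (pos+t)//8 outside [-len(array), len(array)).
def Pre_ReadSignall (array : List Int) (SignallName : Int × Int) : Prop :=
  SignallName.2 ≤ 0 ∨
    (-(array.length : Int) ≤ PySem.Int.floordiv SignallName.1 8 ∧
      PySem.Int.floordiv (SignallName.1 + SignallName.2 - 1) 8 < (array.length : Int))
instance (array : List Int) (SignallName : Int × Int) : Decidable (Pre_ReadSignall array SignallName) := by
  unfold Pre_ReadSignall; infer_instance

def pvWitness_ReadSignall : List Int × (Int × Int) := ([173, 46], (3, 9))

def Spec_ReadSignall (array : List Int) (SignallName : Int × Int) (out : Int) : Prop := out = ReadSignall_alt array SignallName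
instance (array : List Int) (SignallName : Int × Int) (out : Int) : Decidable (Spec_ReadSignall array SignallName out) := by unfold Spec_ReadSignall; infer_instance

-- ===== CLAIM (what is proved, stated in full; the proofs are below) =====
def Claim_equal_ReadSignall : Prop := ∀ (array : List Int) (SignallName : Int × Int), Dom_ReadSignall array SignallName → Pre_ReadSignall array SignallName → Spec_ReadSignall array SignallName (ReadSignall array SignallName)

-- ===== LEMMAS AND PROOFS =====

-- the source bit tested by both programs at offset t from pos
abbrev pvBit (array : List Int) (pos : Int) (t : Nat) : Prop :=
  PySem.Int.band ((PySem.List.pyGet? array (PySem.Int.floordiv (pos + t) 8)).getD 0)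
    ((1 : Int) <<< (PySem.Int.mod (pos + t) 8).toNat) ≠ 0

-- Σ_{t = k}^{k+n-1} [bit t set] * 2^t
def pvSum (array : List Int) (pos : Int) : Nat → Nat → Int
  | _, 0 => 0
  | k, n + 1 => (if pvBit array pos k then 2 ^ k else 0) + pvSum array pos (k + 1) n

theorem pvAlt_loop (array : List Int) (pos : Int) :
    ∀ (n k : Nat) (acc : Int),
      (PySem.List.pyRange (k : Int) ((k : Int) + (n : Nat)) 1).foldl
        (fun value p =>
          let i := pos + p
          if PySem.Int.band ((PySem.List.pyGet? array (PySem.Int.floordiv i 8)).getD 0)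
               ((1 : Int) <<< (PySem.Int.mod i 8).toNat) ≠ 0 then
            value + ((1 : Int) <<< p.toNat)
          else value)
        acc = acc + pvSum array pos k n := by
  intro n
  induction n with
  | zero =>
    intro k acc
    rw [PySem.List.pyRange_one_eq_nil (by simp)]
    simp [pvSum]
  | succ n ih =>
    intro k acc
    rw [PySem.List.pyRange_one_cons (by push_cast; omega)]
    simp only [List.foldl_cons]
    have hk : ((k : Int) + 1) = ((k + 1 : Nat) : Int) := by push_cast; ring
    have harg : (k : Int) + ((n + 1 : Nat) : Int) = ((k + 1 : Nat) : Int) + (n : Int) := by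
      push_cast; ring
    rw [harg, hk, ih (k + 1)]
    simp only [pvSum, pvBit, Int.toNat_natCast, Int.shiftLeft_eq, one_mul]
    split_ifs with h
    · ring
    · ring

theorem pvAltEq (array : List Int) (pos leng : Int) :
    ReadSignall_alt array (pos, leng) = pvSum array pos 0 leng.toNat := by
  unfold ReadSignall_alt
  dsimp only
  by_cases h : leng ≤ 0
  · rw [PySem.List.pyRange_one_eq_nil h]
    have : leng.toNat = 0 := by omega
    simp [this, pvSum]
  · have h : (0:Int) < leng := by omega
    have h0 : (0 : Int) = ((0 : Nat) : Int) := rfl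
    have h1 : leng = ((0 : Nat) : Int) + (leng.toNat : Int) := by omega
    calc (PySem.List.pyRange 0 leng 1).foldl _ 0
        = (PySem.List.pyRange ((0 : Nat) : Int) (((0 : Nat) : Int) + (leng.toNat : Int)) 1).foldl _ 0 := by
          rw [← h1]; rfl
      _ = 0 + pvSum array pos 0 leng.toNat := pvAlt_loop array pos leng.toNat 0 0
      _ = pvSum array pos 0 leng.toNat := by ring

theorem pvA_loop (array : List Int) (pos : Int) :
    ∀ (n k : Nat) (value sv : Int),
      ∃ value' sv',
        (PySem.List.pyRange (pos + (k : Int)) (pos + (k : Int) + (n : Nat)) 1).foldl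
            (ReadSignallBody array) ((k : Int), value, sv, ((8 * (k / 8) : Nat) : Int))
          = (((k + n : Nat) : Int), value', sv', ((8 * ((k + n) / 8) : Nat) : Int)) ∧
        value' + sv' * 2 ^ (8 * ((k + n) / 8)) = value + sv * 2 ^ (8 * (k / 8)) + pvSum array pos k n := by
  intro n
  induction n with
  | zero =>
    intro k value sv
    refine ⟨value, sv, ?_, by simp [pvSum]⟩
    rw [PySem.List.pyRange_one_eq_nil (by simp)]
    simp
  | succ n ih =>
    intro k value sv
    rw [PySem.List.pyRange_one_cons (by push_cast; omega)]
    simp only [List.foldl_cons]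
    have hmod : PySem.Int.mod ((k : Nat) : Int) 8 = ((k % 8 : Nat) : Int) := PySem.Int.mod_natCast k 8
    -- reduce the first body application
    have hbody : ReadSignallBody array ((k : Int), value, sv, ((8 * (k / 8) : Nat) : Int)) (pos + (k : Int))
        = (((k + 1 : Nat) : Int),
           (if k % 8 = 7 then
              value + (if pvBit array pos k then sv + 2 ^ (k % 8) else sv) * 2 ^ (8 * (k / 8))
            else value),
           (if k % 8 = 7 then 0 else (if pvBit array pos k then sv + 2 ^ (k % 8) else sv)),
           ((8 * ((k + 1) / 8) : Nat) : Int)) := by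
      unfold ReadSignallBody pvBit
      simp only [hmod, Int.toNat_natCast, Int.shiftLeft_eq, one_mul]
      have h1 : ((k : Int) + 1) = ((k + 1 : Nat) : Int) := by push_cast; ring
      by_cases h7 : k % 8 = 7
      · have h7' : ((k % 8 : Nat) : Int) = 7 := by rw [h7]; rfl
        have h4 : ((8 * (k / 8) : Nat) : Int) + 8 = ((8 * ((k + 1) / 8) : Nat) : Int) := by
          push_cast; omega
        simp only [h7', if_pos h7]
        split_ifs with hb <;> rw [h1, h4]
      · have h7' : ¬ ((k % 8 : Nat) : Int) = 7 := by
          intro hc; exact h7 (by exact_mod_cast hc)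
        have h4 : ((8 * (k / 8) : Nat) : Int) = ((8 * ((k + 1) / 8) : Nat) : Int) := by
          push_cast; omega
        simp only [if_neg h7', if_neg h7]
        split_ifs with hb <;> rw [h1, h4]
    rw [hbody]
    have harg : pos + (k : Int) + 1 = pos + ((k + 1 : Nat) : Int) := by push_cast; ring
    have harg2 : pos + (k : Int) + ((n + 1 : Nat) : Int) = pos + ((k + 1 : Nat) : Int) + (n : Int) := by
      push_cast; ring
    rw [harg, harg2]
    obtain ⟨v', sv', hfold, hQ⟩ := ih (k + 1)
      (if k % 8 = 7 then
         value + (if pvBit array pos k then sv + 2 ^ (k % 8) else sv) * 2 ^ (8 * (k / 8))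
       else value)
      (if k % 8 = 7 then 0 else (if pvBit array pos k then sv + 2 ^ (k % 8) else sv))
    refine ⟨v', sv', ?_, ?_⟩
    · rw [hfold]
      have : k + 1 + n = k + (n + 1) := by omega
      rw [this]
    · have hkn : k + 1 + n = k + (n + 1) := by omega
      rw [hkn] at hQ
      have hpow : (2 : Int) ^ (k % 8) * 2 ^ (8 * (k / 8)) = 2 ^ k := by
        rw [← pow_add]
        congr 1
        omega
      simp only [pvSum]
      by_cases h7 : k % 8 = 7
      · simp only [if_pos h7] at hQ ⊢
        rw [hQ]
        split_ifs with hb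
        · rw [← hpow]; ring
        · ring
      · have hj : 8 * ((k + 1) / 8) = 8 * (k / 8) := by omega
        rw [hj] at hQ
        simp only [if_neg h7] at hQ ⊢
        rw [hQ]
        split_ifs with hb
        · rw [← hpow]; ring
        · ring

theorem pvAEq (array : List Int) (pos leng : Int) :
    ReadSignall array (pos, leng) = pvSum array pos 0 leng.toNat := by
  unfold ReadSignall
  dsimp only
  by_cases h : leng ≤ 0
  · rw [PySem.List.pyRange_one_eq_nil (by omega)]
    have : leng.toNat = 0 := by omega
    simp [this, pvSum]
  · have h' : (0:Int) < leng := by omega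
    obtain ⟨v', sv', hfold, hQ⟩ := pvA_loop array pos leng.toNat 0 0 0
    have harg : pos + ((0 : Nat) : Int) + (leng.toNat : Int) = pos + leng := by
      push_cast; omega
    rw [harg] at hfold
    have hinit : (((0 : Nat) : Int), (0 : Int), (0 : Int), ((8 * (0 / 8) : Nat) : Int))
        = ((0 : Int), (0 : Int), (0 : Int), (0 : Int)) := by norm_num
    rw [hinit] at hfold
    have harg0 : pos + ((0 : Nat) : Int) = pos := by norm_num
    rw [harg0] at hfold
    rw [hfold]
    simp only [Int.toNat_natCast, Int.shiftLeft_eq]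
    have h0 : (0 : Nat) + leng.toNat = leng.toNat := by omega
    rw [h0] at hQ ⊢
    rw [hQ]
    ring

-- ===== VERDICT (by name: the statement is the Claim_ definition above) =====
theorem ReadSignall_spec : Claim_equal_ReadSignall := by
  intro array SignallName _ _
  unfold Spec_ReadSignall
  obtain ⟨pos, leng⟩ := SignallName
  rw [pvAEq, pvAltEq]
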